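-- pv_equiv track=rewrite | github.com/Abd210/BioInformatics | lab11/ex2_3.py | format_alignment_blocks
-- ===== SOURCE A (Python) =====
-- def make_midline(a1: str, a2: str) -> str:
--     out = []
--     for x, y in zip(a1, a2):
--         if x == '-' or y == '-':
--             out.append(' ')
--         elif x == y and x != 'N':
--             out.append('|')
--         else:
--             out.append('.')
--     return "".join(out)
--
-- def format_alignment_blocks(a1: str, a2: str, width: int = 120) -> str:
--     mid = make_midline(a1, a2)
--     out = []
--     for i in range(0, len(a1), width):
--         out.append(a1[i:i + width])
--         out.append(mid[i:i + width])
--         out.append(a2[i:i + width])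
--         out.append("")
--     return "\n".join(out)
-- ===== SOURCE B (Python) =====
-- def format_alignment_blocks(a1: str, a2: str, width: int = 120) -> str:
--     blocks = []
--     for i in range(0, len(a1), width):
--         c1 = a1[i:i + width]
--         c2 = a2[i:i + width]
--         mid = "".join(
--             ' ' if x == '-' or y == '-' else ('|' if x == y and x != 'N' else '.')
--             for x, y in zip(c1, c2)
--         )
--         blocks.append(c1 + "\n" + mid + "\n" + c2)
--     return "\n\n".join(blocks) + "\n" if blocks else ""
-- ===== Notes on version B (the rewrite author's own statement) =====
-- stated objective: simpler
-- what changed: B drops the separate full-length make_midline pass and the flat out-list-with-empty-sentinels assembly: it computes each block's midline inline from the zipped chunks and assembles whole per-block strings joined by a blank line, with a single trailing newline.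
import Mathlib
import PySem

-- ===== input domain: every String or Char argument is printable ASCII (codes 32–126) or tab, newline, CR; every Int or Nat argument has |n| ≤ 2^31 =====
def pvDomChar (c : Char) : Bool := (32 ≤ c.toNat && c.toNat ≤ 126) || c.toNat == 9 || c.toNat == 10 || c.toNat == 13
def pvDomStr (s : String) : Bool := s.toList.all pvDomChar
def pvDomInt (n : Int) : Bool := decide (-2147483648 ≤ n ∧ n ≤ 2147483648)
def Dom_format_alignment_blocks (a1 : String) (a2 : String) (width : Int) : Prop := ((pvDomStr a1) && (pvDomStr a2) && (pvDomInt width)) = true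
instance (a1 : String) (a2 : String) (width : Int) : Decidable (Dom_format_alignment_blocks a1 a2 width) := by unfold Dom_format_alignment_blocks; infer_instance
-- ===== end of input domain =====

-- B drops the separate full-length make_midline pass and the flat list-with-""-sentinels
-- assembly: it builds each block's midline from the zipped chunks and joins whole block
-- strings with a blank line plus one trailing newline (objective: simpler decomposition).

-- ===== PORT A =====
-- make_midline: out is a list of 1-char strings in Python; "".join(out) = String.ofList of the chars
def make_midline (a1 : String) (a2 : String) : String :=
  let out : List Char := (a1.toList.zip a2.toList).foldl (fun out p =>
    if p.1 = '-' ∨ p.2 = '-' then out ++ [' ']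
    else if p.1 = p.2 ∧ p.1 ≠ 'N' then out ++ ['|']
    else out ++ ['.']) []
  String.ofList out

def format_alignment_blocks (a1 : String) (a2 : String) (width : Int) : String :=
  let mid := make_midline a1 a2
  let out : List String := (PySem.List.pyRange 0 (PySem.Str.len a1) width).foldl
    (fun out i => out
      ++ [PySem.Str.slice a1 (some i) (some (i + width)),
          PySem.Str.slice mid (some i) (some (i + width)),
          PySem.Str.slice a2 (some i) (some (i + width)), ""]) []
  PySem.Str.join "\n" out

-- ===== PORT B =====
def format_alignment_blocks_alt (a1 : String) (a2 : String) (width : Int) : String :=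
  let blocks : List String := (PySem.List.pyRange 0 (PySem.Str.len a1) width).foldl
    (fun bs i =>
      let c1 := PySem.Str.slice a1 (some i) (some (i + width))
      let c2 := PySem.Str.slice a2 (some i) (some (i + width))
      let mid := String.ofList ((c1.toList.zip c2.toList).map (fun p =>
        if p.1 = '-' ∨ p.2 = '-' then ' '
        else if p.1 = p.2 ∧ p.1 ≠ 'N' then '|' else '.'))
      -- c1 + "\n" + mid + "\n" + c2, as one join
      bs ++ [PySem.Str.join "\n" [c1, mid, c2]]) []
  if blocks = [] then "" else PySem.Str.join "" [PySem.Str.join "\n\n" blocks, "\n"]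

-- ===== PRECONDITION & SPEC =====
-- width = 0 makes Python's range(0, len(a1), 0) raise ValueError in both A and B.
def Pre_format_alignment_blocks (a1 : String) (a2 : String) (width : Int) : Prop := width ≠ 0
instance (a1 : String) (a2 : String) (width : Int) : Decidable (Pre_format_alignment_blocks a1 a2 width) := by unfold Pre_format_alignment_blocks; infer_instance
def pvWitness_format_alignment_blocks : String × String × Int := ("ACGTN", "AC-TT", 3)
def Spec_format_alignment_blocks (a1 : String) (a2 : String) (width : Int) (out : String) : Prop := out = format_alignment_blocks_alt a1 a2 width
instance (a1 : String) (a2 : String) (width : Int) (out : String) : Decidable (Spec_format_alignment_blocks a1 a2 width out) := by unfold Spec_format_alignment_blocks; infer_instance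

-- ===== CLAIM (what is proved, stated in full; the proofs are below) =====
def Claim_equal_format_alignment_blocks : Prop := ∀ (a1 : String) (a2 : String) (width : Int), Dom_format_alignment_blocks a1 a2 width → Pre_format_alignment_blocks a1 a2 width → Spec_format_alignment_blocks a1 a2 width (format_alignment_blocks a1 a2 width)

-- ===== LEMMAS AND PROOFS =====

def pvMidChar (p : Char × Char) : Char :=
  if p.1 = '-' ∨ p.2 = '-' then ' '
  else if p.1 = p.2 ∧ p.1 ≠ 'N' then '|' else '.'

theorem pv_zip_drop {α β : Type} (l1 : List α) (l2 : List β) (n : Nat) :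
    (l1.zip l2).drop n = (l1.drop n).zip (l2.drop n) := by
  induction l1 generalizing l2 n with
  | nil => simp
  | cons x xs ih =>
    cases l2 with
    | nil => simp
    | cons y ys => cases n with
      | zero => simp
      | succ m => simpa using ih ys m

theorem pv_zip_take {α β : Type} (l1 : List α) (l2 : List β) (n : Nat) :
    (l1.zip l2).take n = (l1.take n).zip (l2.take n) := by
  induction l1 generalizing l2 n with
  | nil => simp
  | cons x xs ih =>
    cases l2 with
    | nil => simp
    | cons y ys => cases n with
      | zero => simp
      | succ m => simpa using ih ys m

theorem pv_midline_fold (l : List (Char × Char)) (acc : List Char) :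
    l.foldl (fun out p =>
      if p.1 = '-' ∨ p.2 = '-' then out ++ [' ']
      else if p.1 = p.2 ∧ p.1 ≠ 'N' then out ++ ['|']
      else out ++ ['.']) acc = acc ++ l.map pvMidChar := by
  induction l generalizing acc with
  | nil => simp
  | cons p rest ih =>
    simp only [List.foldl_cons, List.map_cons, ih, pvMidChar]
    split_ifs <;> simp

theorem pv_make_midline_toList (a1 a2 : String) :
    (make_midline a1 a2).toList = (a1.toList.zip a2.toList).map pvMidChar := by
  simp [make_midline, pv_midline_fold]

-- the assembly-shape lemma: A's flat 4-per-block join equals B's per-block join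
theorem pv_join_shape_ne {α : Type} (sep : List Char) (f g h : α → List Char) (x : α) (l : List α) :
    PySem.Chars.join sep ((x :: l).flatMap (fun t => [f t, g t, h t, []])) =
      PySem.Chars.join (sep ++ sep)
        ((x :: l).map (fun t => PySem.Chars.join sep [f t, g t, h t])) ++ sep := by
  induction l generalizing x with
  | nil => simp [PySem.Chars.join_cons_cons, PySem.Chars.join_singleton, List.append_assoc]
  | cons y ys ih =>
    simp only [List.flatMap_cons, List.map_cons, List.cons_append, List.nil_append,
      PySem.Chars.join_cons_cons, PySem.Chars.join_singleton] at ih ⊢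
    have h2 := ih y
    simp only [List.append_assoc] at h2 ⊢
    rw [h2]

theorem pv_join_shape {α : Type} (sep : List Char) (f g h : α → List Char) (l : List α) :
    PySem.Chars.join sep (l.flatMap (fun x => [f x, g x, h x, []])) =
      (if l = [] then []
       else PySem.Chars.join (sep ++ sep) (l.map (fun x => PySem.Chars.join sep [f x, g x, h x])) ++ sep) := by
  cases l with
  | nil => simp [PySem.Chars.join_nil]
  | cons x xs => simpa using pv_join_shape_ne sep f g h x xs

-- for i in the loop (width > 0), A's slice of the precomputed midline is B's chunk midline
theorem pv_mid_slice (a1 a2 : String) (width i : Int) (h0 : 0 ≤ i) (hw : 0 < width) :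
    (PySem.Str.slice (make_midline a1 a2) (some i) (some (i + width))).toList =
      (((PySem.Str.slice a1 (some i) (some (i + width))).toList.zip
        (PySem.Str.slice a2 (some i) (some (i + width))).toList).map pvMidChar) := by
  have h1 : (0:Int) ≤ i + width := by omega
  simp only [PySem.Str.toList_slice, PySem.Chars.slice_eq_listSlice]
  rw [PySem.List.slice_toNat _ h0 h1, PySem.List.slice_toNat _ h0 h1,
      PySem.List.slice_toNat _ h0 h1, pv_make_midline_toList]
  rw [← List.map_drop, ← List.map_take, pv_zip_drop, pv_zip_take]

-- ===== VERDICT (by name: the statement is the Claim_ definition above) =====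
theorem pv_flatMap_singleton {α β : Type} (f : α → β) (l : List α) :
    List.flatMap (fun x => [f x]) l = l.map f := by
  induction l with
  | nil => rfl
  | cons a t ih => simp only [List.flatMap_cons, List.map_cons, ih, List.singleton_append]

theorem pv_pyRange_neg (n w : Int) (hn : 0 ≤ n) (hw : w < 0) : PySem.List.pyRange 0 n w = [] := by
  unfold PySem.List.pyRange
  rw [if_neg (by omega : ¬ w = 0), if_neg (by omega : ¬ 0 < w), if_neg (by omega : ¬ n < 0)]
  simp

set_option maxHeartbeats 1000000 in
theorem format_alignment_blocks_spec : Claim_equal_format_alignment_blocks := by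
  intro a1 a2 width _ hpre
  unfold Spec_format_alignment_blocks format_alignment_blocks format_alignment_blocks_alt
  simp only [PySem.List.foldl_append_eq_flatMap, List.nil_append]
  set L := PySem.List.pyRange 0 (PySem.Str.len a1) width with hLdef
  by_cases hL : L = []
  · apply String.toList_inj.mp
    simp [hL, PySem.Str.toList_join, PySem.Chars.join_nil]
  · have hw : 0 < width := by
      rcases lt_trichotomy width 0 with h | h | h
      · exact absurd (pv_pyRange_neg _ _ (by simp [PySem.Str.len]) h) hL
      · exact absurd h hpre
      · exact h
    have hmem : ∀ i ∈ L, 0 ≤ i := by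
      intro i hi
      exact ((PySem.List.mem_pyRange_iff_of_pos hw i).mp hi).1
    rw [pv_flatMap_singleton, if_neg (by simp [hL] : ¬ L.map _ = [])]
    apply String.toList_inj.mp
    simp only [PySem.Str.toList_join, List.map_flatMap, List.map_map, List.map_cons,
      List.map_nil, String.toList_empty, Function.comp]
    rw [List.flatMap_congr
        (g := fun x => [(PySem.Str.slice a1 (some x) (some (x + width))).toList,
          ((PySem.Str.slice a1 (some x) (some (x + width))).toList.zip
            (PySem.Str.slice a2 (some x) (some (x + width))).toList).map pvMidChar,
          (PySem.Str.slice a2 (some x) (some (x + width))).toList, []])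
        (fun x hx => by rw [pv_mid_slice a1 a2 width x (hmem x hx) hw])]
    rw [pv_join_shape]
    rw [if_neg hL]
    rw [PySem.Chars.join_cons_cons, PySem.Chars.join_singleton, List.append_nil,
      show ("\n\n".toList) = "\n".toList ++ "\n".toList from rfl]
    refine congrArg (fun t => t ++ "\n".toList) ?_
    refine congrArg _ (List.map_congr_left ?_)
    intro x _
    simp [pvMidChar, PySem.Str.toList_join, PySem.Chars.join_cons_cons,
      PySem.Chars.join_singleton, List.append_assoc]
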